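-- pv_equiv track=rewrite | github.com/YuneeeM/Python_Algorithm | 프로그래머스/pccp/day5/mogo1.py | solution
-- ===== SOURCE A (Python) =====
-- def solution(input_string):
--     answer = ''
--     # 첫번째 와 두번째 데이터가 같은지 물어봄요
--     # i i+1 검색을 위해 문자뒤에 ' '를 붙여주고 시작
--     input_string += ' '
--
--     # 체크를 하면서 중복 제거를 확인하기 위한 빈 set 함수
--     # 외톨이 문자(중복으로 넣으면 되지 않아서 때문에 set())
--     temp = set()
--
--     # 기존문자인가?
--     al = set()
--
--     # 완전 탐색
--     for i in range(len(input_string)-1):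
--         # 연속적인지 판단
--         # 연속이 끊어지면 새로운 글자를 발견
--         if input_string[i] != input_string[i+1]:
--             # 새로운 문자가 발견이 되면 넣어주고
--             if input_string[i] not in al:
--                 al.add(input_string[i])
--             else:  # 아니면 외톨이 문자갇 됨
--                 temp.add(input_string[i])
--
--     if len(temp) == 0:
--         answer = 'N'
--     else:
--         temp = list(temp)
--         temp.sort()
--         answer = ''.join(temp)
--
--     return answer
-- ===== SOURCE B (Python) =====
-- def solution(input_string):
--     # Counting identity: the number of maximal runs of a character c equals
--     # (occurrences of c) - (adjacent equal pairs c,c); c is a "duplicate-run"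
--     # character exactly when that number exceeds 1.
--     pairs = list(zip(input_string, input_string[1:]))
--     dups = [c for c in sorted(set(input_string))
--             if input_string.count(c) - pairs.count((c, c)) > 1]
--     return ''.join(dups) or 'N'
-- ===== Notes on version B (the rewrite author's own statement) =====
-- stated objective: alternative
-- what changed: Replaces A's sentinel-append lookahead loop with two incrementally maintained sets by a per-character counting identity: the number of maximal runs of c equals count(c) minus the number of adjacent (c,c) pairs, so B just compares two counts for each distinct character, with no run scanning or set state at all.
-- intended difference: On strings ending with a space that contain exactly two maximal space runs, A's appended space sentinel merges with the trailing run so that run is never counted and A omits the space character from its answer, while B includes it, which is intended since the space occurs in two separate non-adjacent runs. — e.g. on solution(" a "): A returns "N", B returns " "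
import Mathlib
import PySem

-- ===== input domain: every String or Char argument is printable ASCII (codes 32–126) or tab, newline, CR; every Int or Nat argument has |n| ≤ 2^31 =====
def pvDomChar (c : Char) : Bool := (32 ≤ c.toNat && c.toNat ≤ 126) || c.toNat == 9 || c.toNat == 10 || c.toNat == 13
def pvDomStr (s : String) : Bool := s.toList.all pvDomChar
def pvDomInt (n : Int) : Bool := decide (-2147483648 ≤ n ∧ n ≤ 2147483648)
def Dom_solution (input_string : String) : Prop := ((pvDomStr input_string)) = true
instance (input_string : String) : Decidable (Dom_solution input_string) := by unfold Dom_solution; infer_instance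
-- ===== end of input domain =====

-- B replaces A's sentinel-append lookahead loop (two incremental sets) by a per-character
-- counting identity: #runs of c = #occurrences of c − #adjacent (c,c) pairs; no run scan, no sets.
-- On strings ending with a space that have exactly two space runs, A's sentinel swallows the
-- trailing space run and A omits the space character; B reports it (intended) — see D_solution below.


-- ===== PORT A =====
def solution (input_string : String) : String :=
  -- input_string += ' '
  let s : List Char := (input_string ++ " ").toList
  -- for i in range(len(input_string)-1): maintain (al, temp)
  let st : PySem.Set Char × PySem.Set Char :=
    (List.range (s.length - 1)).foldl
      (fun st i =>
        if s.getD i ' ' ≠ s.getD (i + 1) ' ' then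
          if ¬ (PySem.Set.contains st.1 (s.getD i ' ')) then
            (PySem.Set.add st.1 (s.getD i ' '), st.2)
          else
            (st.1, PySem.Set.add st.2 (s.getD i ' '))
        else st)
      (PySem.Set.empty, PySem.Set.empty)
  let temp := st.2
  if PySem.Set.len temp = 0 then "N"
  else String.ofList (PySem.List.sorted temp (fun x => x) false)

-- ===== PORT B =====
def solution_alt (input_string : String) : String :=
  let l := input_string.toList
  -- pairs = list(zip(input_string, input_string[1:]))  (zip truncates; s[1:] = drop 1)
  let pairs : List (Char × Char) := l.zip (l.drop 1)
  -- [c for c in sorted(set(s)) if s.count(c) - pairs.count((c, c)) > 1]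
  -- (str.count of a single char = char count)
  let dups : List Char :=
    (PySem.List.sorted (PySem.Set.ofList l) (fun x => x) false).filter
      (fun c => decide ((l.count c : Int) - (pairs.count (c, c) : Int) > 1))
  -- ''.join(dups) or 'N'
  if dups = [] then "N" else String.ofList dups

-- ===== PRECONDITION & SPEC =====
-- On strings ending with a space that have exactly two maximal space runs (number of runs of a
-- char = its count minus the count of adjacent equal pairs), A returns the answer without the
-- space character (its sentinel merges with the trailing run, so that run is never counted),
-- while B includes it, which is intended: the space occurs in two non-adjacent runs.
def D_solution (input_string : String) : Prop :=
  input_string.toList.getLast? = some ' ' ∧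
    input_string.toList.count ' '
      - (input_string.toList.zip (input_string.toList.drop 1)).count (' ', ' ') = 2

instance (input_string : String) : Decidable (D_solution input_string) := by
  unfold D_solution; infer_instance

def Spec_solution (input_string : String) (out : String) : Prop :=
  ¬ D_solution input_string → out = solution_alt input_string
instance (input_string : String) (out : String) : Decidable (Spec_solution input_string out) := by
  unfold Spec_solution; infer_instance

def pvDiffWitness_solution : String := " a "
def pvDiffWitnessOut_solution : String × String := ("N", " ")

-- ===== CLAIM (what is proved, stated in full; the proofs are below) =====
def Claim_unchanged_solution : Prop := ∀ (input_string : String), Dom_solution input_string → Spec_solution input_string (solution input_string)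
def Claim_changed_solution : Prop := Dom_solution (pvDiffWitness_solution) ∧ D_solution (pvDiffWitness_solution) ∧ solution (pvDiffWitness_solution) = pvDiffWitnessOut_solution.1 ∧ solution_alt (pvDiffWitness_solution) = pvDiffWitnessOut_solution.2 ∧ pvDiffWitnessOut_solution.1 ≠ pvDiffWitnessOut_solution.2
def Claim_exact_solution : Prop := ∀ (input_string : String), Dom_solution input_string → D_solution input_string → solution input_string ≠ solution_alt input_string

-- ===== LEMMAS AND PROOFS =====

-- number of maximal runs of character c in a list (p = "previous char was c")
def runsAux (c : Char) (p : Bool) : List Char → Nat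
  | [] => 0
  | a :: l => if a = c ∧ p = false then 1 + runsAux c true l else runsAux c (decide (a = c)) l

-- run representatives, recursively (prev-char parameter): the chars A's loop classifies
def crep (p : Option Char) : List Char → List Char
  | [] => []
  | a :: l => if some a ≠ p then a :: crep (some a) l else crep p l

-- the chars A's loop looks at: each char followed by a different one
def scanPairs : List Char → List Char
  | [] => []
  | [_] => []
  | a :: b :: l => if a ≠ b then a :: scanPairs (b :: l) else scanPairs (b :: l)

theorem foldl_range_filter_map {α β : Type} (g : β → α → β) (f : Nat → α)
    (P : Nat → Prop) [DecidablePred P] :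
    ∀ (n : Nat) (init : β),
      (List.range n).foldl (fun st i => if P i then g st (f i) else st) init
        = (((List.range n).filter (fun i => decide (P i))).map f).foldl g init := by
  intro n
  induction n with
  | zero => intro init; simp
  | succ n ih =>
    intro init
    simp only [List.range_succ, List.foldl_append, List.filter_append, List.map_append, ih]
    by_cases h : P n <;> simp [h]

theorem foldA_range (l : List Char) (init : PySem.Set Char × PySem.Set Char) :
    (List.range (l.length - 1)).foldl
      (fun st i =>
        if l.getD i ' ' ≠ l.getD (i + 1) ' ' then
          if ¬ (PySem.Set.contains st.1 (l.getD i ' ')) then (PySem.Set.add st.1 (l.getD i ' '), st.2)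
          else (st.1, PySem.Set.add st.2 (l.getD i ' '))
        else st) init
    = (((List.range (l.length - 1)).filter
        (fun i => decide (l.getD i ' ' ≠ l.getD (i + 1) ' '))).map (fun i => l.getD i ' ')).foldl
      (fun st x =>
        if ¬ (PySem.Set.contains st.1 x) then (PySem.Set.add st.1 x, st.2)
        else (st.1, PySem.Set.add st.2 x)) init :=
  foldl_range_filter_map
    (fun st x =>
      if ¬ (PySem.Set.contains st.1 x) then (PySem.Set.add st.1 x, st.2)
      else (st.1, PySem.Set.add st.2 x))
    (fun i => l.getD i ' ')
    (fun i => l.getD i ' ' ≠ l.getD (i + 1) ' ') (l.length - 1) init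

theorem pairs_eq_scanPairs (d : Char) : ∀ (l : List Char),
    (((List.range (l.length - 1)).filter
        (fun i => decide (l.getD i d ≠ l.getD (i + 1) d))).map (fun i => l.getD i d))
      = scanPairs l
  | [] => by simp [scanPairs]
  | [a] => by simp [scanPairs]
  | a :: b :: l => by
    have ih := pairs_eq_scanPairs d (b :: l)
    simp only [List.length_cons]
    rw [show l.length + 1 + 1 - 1 = l.length + 1 from rfl]
    rw [List.range_succ_eq_map]
    simp only [List.filter_cons, List.getD_cons_zero, List.getD_cons_succ,
      List.filter_map]
    have htail :
        List.map (fun i => (a :: b :: l).getD i d)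
          (List.map Nat.succ
            (List.filter ((fun i => decide ((a :: b :: l).getD i d ≠ (b :: l).getD i d)) ∘ Nat.succ)
              (List.range l.length)))
        = scanPairs (b :: l) := by
      rw [List.map_map]
      rw [show ((fun i => (a :: b :: l).getD i d) ∘ Nat.succ) = (fun i => (b :: l).getD i d) by
        funext i; simp [Function.comp]]
      rw [show ((fun i => decide ((a :: b :: l).getD i d ≠ (b :: l).getD i d)) ∘ Nat.succ)
          = (fun i => decide ((b :: l).getD i d ≠ (b :: l).getD (i + 1) d)) by
        funext i; simp [Function.comp]]
      simpa using ih
    by_cases h : a = b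
    · subst h
      rw [if_neg (by simp)]
      rw [htail]
      simp [scanPairs]
    · rw [if_pos (by simpa using h)]
      simp only [List.map_cons, List.getD_cons_zero]
      rw [htail]
      simp [scanPairs, h]

theorem scanPairs_cons (a : Char) : ∀ (l : List Char),
    scanPairs (a :: l) = (a :: crep (some a) l).dropLast
  | [] => by simp [scanPairs, crep]
  | b :: l => by
    have ih := scanPairs_cons b l
    by_cases h : a = b
    · subst h
      show scanPairs (a :: a :: l) = _
      simp only [scanPairs, ne_eq, not_true_eq_false, if_false, ih]
      congr 1
      rw [crep]
      simp
    · simp only [scanPairs, ne_eq, h, not_false_iff, if_true, ih]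
      rw [show crep (some a) (b :: l) = b :: crep (some b) l by rw [crep]; simp [Ne.symm h]]
      rw [List.dropLast_cons_of_ne_nil (l := b :: crep (some b) l) (by simp)]

theorem scanPairs_eq_dropLast_crep : ∀ (l : List Char),
    scanPairs l = (crep none l).dropLast
  | [] => by simp [scanPairs, crep]
  | a :: l => by
    rw [scanPairs_cons]
    simp [crep]

theorem getLast?_or_cons (a : Char) (l : List Char) (p : Option Char) :
    ((a :: l).getLast?).or p = (l.getLast?).or (some a) := by
  cases l using List.reverseRecOn with
  | nil => simp
  | append_singleton l x =>
    have h1 : (a :: (l ++ [x])).getLast? = some x := by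
      rw [show a :: (l ++ [x]) = (a :: l) ++ [x] from rfl, List.getLast?_concat]
    have h2 : (l ++ [x]).getLast? = some x := List.getLast?_concat
    rw [h1, h2]
    simp [Option.or]

theorem crep_append_single (x : Char) : ∀ (l : List Char) (p : Option Char),
    crep p (l ++ [x]) = crep p l ++ (if some x ≠ (l.getLast?.or p) then [x] else [])
  | [], p => by simp [crep]
  | a :: l, p => by
    have ih := crep_append_single x l (some a)
    have ih2 := crep_append_single x l p
    by_cases h : some a = p
    · simp only [List.cons_append, crep, h, ne_eq, not_true_eq_false, if_false, ih2]
      rw [getLast?_or_cons, ← h]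
    · simp only [List.cons_append, crep, h, ne_eq, not_false_iff, if_true, ih]
      rw [getLast?_or_cons]

theorem getLast_crep : ∀ (l : List Char) (p : Option Char),
    (crep p l).getLast?.or p = l.getLast?.or p
  | [], _ => rfl
  | a :: l, p => by
    have ih := getLast_crep l (some a)
    have ih2 := getLast_crep l p
    by_cases h : some a = p
    · simp only [crep, h, ne_eq, not_true_eq_false, if_false, ih2]
      rw [getLast?_or_cons, ← h]
    · simp only [crep, h, ne_eq, not_false_iff, if_true]
      rw [getLast?_or_cons, getLast?_or_cons, ih]

-- count of c in the run representatives = number of maximal runs of c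
theorem count_crep_runs (c : Char) : ∀ (l : List Char) (p : Option Char),
    (crep p l).count c = runsAux c (decide (p = some c)) l
  | [], _ => by simp [crep, runsAux]
  | a :: l, p => by
    have ih := count_crep_runs c l (some a)
    have ih2 := count_crep_runs c l p
    by_cases h : some a = p
    · subst h
      by_cases ha : a = c <;> simp_all [crep, runsAux]
    · by_cases ha : a = c
      · have hp : ¬ p = some c := fun hp => h (by rw [hp, ha])
        simp_all [crep, runsAux]
        omega
      · simp_all [crep, runsAux]

-- B's counting identity: #occurrences = #runs + #adjacent equal pairs (+ boundary term)
theorem count_ident (c : Char) : ∀ (l : List Char) (p : Bool),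
    l.count c = runsAux c p l + (l.zip (l.drop 1)).count (c, c)
      + (if p = true ∧ l.head? = some c then 1 else 0)
  | [], p => by simp [runsAux]
  | [a], p => by
    by_cases ha : a = c <;> by_cases hp : p = true <;> simp_all [runsAux]
  | a :: b :: l, p => by
    have ih := count_ident c (b :: l) (decide (a = c))
    have hz : ((a :: b :: l).zip ((a :: b :: l).drop 1)).count (c, c)
        = (if a = c ∧ b = c then 1 else 0) + ((b :: l).zip ((b :: l).drop 1)).count (c, c) := by
      simp only [List.drop_succ_cons, List.drop_zero, List.zip_cons_cons, List.count_cons]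
      by_cases ha : a = c <;> by_cases hb : b = c <;> simp [ha, hb, Prod.ext_iff] <;> omega
    rw [List.count_cons] at *
    rw [hz]
    by_cases ha : a = c <;> by_cases hp : p = true <;> by_cases hb : b = c <;>
      simp_all [runsAux] <;> omega

-- the run count of D_solution's counting form, for any char
theorem runs_eq_counts (c : Char) (t : List Char) :
    runsAux c false t = t.count c - (t.zip (t.drop 1)).count (c, c) := by
  have h := count_ident c t false
  simp only [Bool.false_eq_true, false_and, if_false, Nat.add_zero] at h
  omega

-- A's classification loop: membership of the final sets
theorem foldA_spec : ∀ (L : List Char) (al temp : PySem.Set Char),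
    al.Nodup → temp.Nodup →
    let r := L.foldl
      (fun (st : PySem.Set Char × PySem.Set Char) x =>
        if ¬ (PySem.Set.contains st.1 x) then (PySem.Set.add st.1 x, st.2)
        else (st.1, PySem.Set.add st.2 x)) (al, temp)
    r.1.Nodup ∧ r.2.Nodup ∧
    (∀ c, c ∈ r.1 ↔ c ∈ al ∨ c ∈ L) ∧
    (∀ c, c ∈ r.2 ↔ c ∈ temp ∨ (c ∈ L ∧ (c ∈ al ∨ 2 ≤ L.count c))) := by
  intro L
  induction L with
  | nil => intro al temp h1 h2; refine ⟨h1, h2, by simp, by simp⟩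
  | cons x L ih =>
    intro al temp h1 h2
    by_cases hx : x ∈ al
    · have hc : PySem.Set.contains al x = true := (PySem.Set.contains_iff al x).2 hx
      simp only [List.foldl_cons, hc, not_true_eq_false, if_false]
      obtain ⟨n1, n2, m1, m2⟩ := ih al (PySem.Set.add temp x) h1 (PySem.Set.nodup_add temp x h2)
      refine ⟨n1, n2, ?_, ?_⟩
      · intro c
        rw [m1]
        simp only [List.mem_cons]
        by_cases hcx : c = x
        · subst hcx; simp [hx]
        · tauto
      · intro c
        rw [m2]
        simp only [PySem.Set.mem_add, List.mem_cons, List.count_cons]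
        by_cases hcx : c = x
        · subst hcx; simp [hx]
        · rw [if_neg (by simpa using Ne.symm hcx)]
          simp only [hcx, Nat.add_zero, false_or, or_false]
    · have hc : PySem.Set.contains al x = false := by
        cases hcc : PySem.Set.contains al x
        · rfl
        · exact absurd ((PySem.Set.contains_iff al x).1 hcc) hx
      simp only [List.foldl_cons, hc, Bool.false_eq_true, not_false_eq_true, if_true]
      obtain ⟨n1, n2, m1, m2⟩ := ih (PySem.Set.add al x) temp (PySem.Set.nodup_add al x h1) h2
      refine ⟨n1, n2, ?_, ?_⟩
      · intro c
        rw [m1]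
        simp only [PySem.Set.mem_add, List.mem_cons]
        tauto
      · intro c
        rw [m2]
        simp only [PySem.Set.mem_add, List.mem_cons, List.count_cons]
        by_cases hcx : c = x
        · subst hcx
          constructor
          · rintro (h | ⟨hL, _⟩)
            · exact Or.inl h
            · refine Or.inr ⟨Or.inl rfl, Or.inr ?_⟩
              have := List.count_pos_iff.2 hL
              rw [if_pos (beq_self_eq_true _)]
              omega
          · rintro (h | ⟨_, hR⟩)
            · exact Or.inl h
            · rcases hR with hal | hcnt
              · exact absurd hal hx
              · rw [if_pos (beq_self_eq_true _)] at hcnt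
                have hmem : c ∈ L := List.count_pos_iff.1 (by omega)
                exact Or.inr ⟨hmem, Or.inl (Or.inr rfl)⟩
        · rw [if_neg (by simpa using Ne.symm hcx)]
          simp only [hcx, Nat.add_zero, false_or, or_false]

-- counts of the chars A scans vs the run representatives of the input (outside D_)
theorem count_LA_iff (t : List Char)
    (hD : ¬ (t.getLast? = some ' ' ∧ runsAux ' ' false t = 2)) (c : Char) :
    (2 ≤ ((crep none (t ++ [' '])).dropLast).count c) ↔ (2 ≤ (crep none t).count c) := by
  rw [crep_append_single]
  by_cases hlast : t.getLast? = some ' '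
  · rw [if_neg (by rw [Option.or_none, hlast]; simp)]
    have hRlast : (crep none t).getLast? = some ' ' := by
      have h := getLast_crep t none
      rw [Option.or_none, Option.or_none, hlast] at h
      exact h
    obtain ⟨r', hr'⟩ := List.getLast?_eq_some_iff.1 hRlast
    have hcnt2 : (crep none t).count ' ' ≠ 2 := by
      rw [count_crep_runs]
      simpa [hlast] using (fun h2 => hD ⟨hlast, h2⟩)
    rw [hr']
    simp only [List.append_nil, List.dropLast_concat]
    by_cases hc : c = ' '
    · subst hc
      have := hcnt2
      rw [hr'] at this
      simp only [List.count_append, List.count_singleton] at this ⊢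
      simp only [beq_self_eq_true, if_pos] at this ⊢
      omega
    · simp only [List.count_append, List.count_singleton]
      rw [if_neg (by simpa using (fun h => hc (by simpa using h.symm)))]
      omega
  · rw [if_pos (by rw [Option.or_none]; exact fun h => hlast h.symm)]
    rw [List.dropLast_concat]

-- membership in B's duplicate list, via the counting identity
theorem mem_dupsB (l : List Char) (c : Char) :
    c ∈ (PySem.List.sorted (PySem.Set.ofList l) (fun x => x) false).filter
          (fun c => decide ((l.count c : Int) - ((l.zip (l.drop 1)).count (c, c) : Int) > 1))
      ↔ 2 ≤ (crep none l).count c := by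
  have hid := count_ident c l false
  simp only [Bool.false_eq_true, false_and, if_false, Nat.add_zero] at hid
  have hruns : (crep none l).count c = runsAux c false l := by
    rw [count_crep_runs]; rfl
  rw [List.mem_filter, PySem.List.mem_sorted, PySem.Set.mem_ofList, hruns, decide_eq_true_iff]
  constructor
  · rintro ⟨-, h⟩
    omega
  · intro h
    have hmem : c ∈ l := List.count_pos_iff.1 (by omega)
    exact ⟨hmem, by omega⟩

-- common final phase: A sorts its set; B's list is already the strictly increasing one
theorem final_step (T D : List Char) (nT : T.Nodup) (hpw : D.Pairwise (· < ·))
    (hm : ∀ c, c ∈ T ↔ c ∈ D) :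
    (if PySem.Set.len T = 0 then "N" else String.ofList (PySem.List.sorted T (fun x => x) false))
    = (if D = [] then "N" else String.ofList D) := by
  have nD : D.Nodup := hpw.imp (fun h => ne_of_lt h)
  have perm : T.Perm D := (List.perm_ext_iff_of_nodup nT nD).2 hm
  by_cases hnil : T = []
  · subst hnil
    have hD : D = [] := perm.symm.eq_nil
    rw [hD]
    simp [PySem.Set.len]
  · have hDne : D ≠ [] := fun h => hnil ((h ▸ perm).eq_nil)
    rw [if_neg (by simpa [PySem.Set.len] using hnil), if_neg hDne]
    congr 1
    exact PySem.List.sorted_eq_of_perm_of_pairwise_lt T D (fun x => x) perm.symm hpw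

theorem solution_eq_alt (s : String) (hD : ¬ D_solution s) :
    solution s = solution_alt s := by
  have hsl : (s ++ " ").toList = s.toList ++ [' '] := by
    rw [String.toList_append]; rfl
  simp only [solution, solution_alt, hsl]
  rw [foldA_range, pairs_eq_scanPairs, scanPairs_eq_dropLast_crep]
  obtain ⟨-, nT, -, mT⟩ := foldA_spec ((crep none (s.toList ++ [' '])).dropLast)
    PySem.Set.empty PySem.Set.empty (by simp [PySem.Set.empty]) (by simp [PySem.Set.empty])
  have hpw : ((PySem.List.sorted (PySem.Set.ofList s.toList) (fun x => x) false).filter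
      (fun c => decide ((s.toList.count c : Int)
        - ((s.toList.zip (s.toList.drop 1)).count (c, c) : Int) > 1))).Pairwise (· < ·) :=
    (PySem.List.sorted_ofList_pairwise_lt s.toList).filter _
  refine final_step _ _ nT hpw ?_
  intro c
  rw [mT c, mem_dupsB]
  have hiff := count_LA_iff s.toList
    (by simp only [D_solution, ← runs_eq_counts] at hD; exact hD) c
  constructor
  · rintro (h | ⟨-, (h | h)⟩)
    · exact absurd h (by simp [PySem.Set.empty])
    · exact absurd h (by simp [PySem.Set.empty])
    · exact hiff.1 h
  · intro h
    have h' := hiff.2 h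
    exact Or.inr ⟨List.count_pos_iff.1 (by omega), Or.inr h'⟩

-- on D_: A's answer omits the space character, B's contains it, so the strings differ
theorem final_ne (T D : List Char) (hT : ' ' ∉ T) (hD : ' ' ∈ D) :
    (if PySem.Set.len T = 0 then "N" else String.ofList (PySem.List.sorted T (fun x => x) false))
    ≠ (if D = [] then "N" else String.ofList D) := by
  have hDnil : D ≠ [] := fun hh => by rw [hh] at hD; exact absurd hD (List.not_mem_nil)
  rw [if_neg hDnil]
  intro h
  by_cases hnil : PySem.Set.len T = 0
  · rw [if_pos hnil] at h
    have h2 : ['N'] = D := by simpa using congrArg String.toList h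
    rw [← h2] at hD
    simp at hD
  · rw [if_neg hnil] at h
    have h2 := congrArg String.toList h
    rw [String.toList_ofList, String.toList_ofList] at h2
    rw [← h2] at hD
    exact hT ((PySem.List.mem_sorted _ _ _ _).1 hD)

theorem solution_ne_on_D (s : String) (hDD : D_solution s) :
    solution s ≠ solution_alt s := by
  have hlast : s.toList.getLast? = some ' ' := hDD.1
  have hsr : runsAux ' ' false s.toList = 2 := by
    rw [runs_eq_counts]; exact hDD.2
  have hsl : (s ++ " ").toList = s.toList ++ [' '] := by
    rw [String.toList_append]; rfl
  simp only [solution, solution_alt, hsl]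
  rw [foldA_range, pairs_eq_scanPairs, scanPairs_eq_dropLast_crep]
  have hRcnt : (crep none s.toList).count ' ' = 2 := by
    rw [count_crep_runs]; simpa using hsr
  have hLA : (crep none (s.toList ++ [' '])).dropLast = (crep none s.toList).dropLast := by
    rw [crep_append_single, if_neg (by rw [Option.or_none, hlast]; simp), List.append_nil]
  have hRlast : (crep none s.toList).getLast? = some ' ' := by
    have h := getLast_crep s.toList none
    rw [Option.or_none, Option.or_none, hlast] at h
    exact h
  obtain ⟨r', hr'⟩ := List.getLast?_eq_some_iff.1 hRlast
  have hr'cnt : r'.count ' ' = 1 := by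
    have h2 := hRcnt
    rw [hr'] at h2
    simp only [List.count_append, List.count_singleton] at h2
    rw [if_pos (beq_self_eq_true _)] at h2
    omega
  have hLAcnt : ((crep none (s.toList ++ [' '])).dropLast).count ' ' = 1 := by
    rw [hLA, hr', List.dropLast_concat, hr'cnt]
  obtain ⟨-, nT, -, mT⟩ := foldA_spec ((crep none (s.toList ++ [' '])).dropLast)
    PySem.Set.empty PySem.Set.empty (by simp [PySem.Set.empty]) (by simp [PySem.Set.empty])
  refine final_ne _ _ ?_ ((mem_dupsB _ _).2 (by omega))
  rw [mT ' ']
  rintro (h | ⟨-, (h | h)⟩)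
  · simp [PySem.Set.empty] at h
  · simp [PySem.Set.empty] at h
  · rw [hLAcnt] at h
    omega

-- ===== VERDICT (by name: the statement is the Claim_ definition above) =====
theorem solution_spec : Claim_unchanged_solution := by
  intro s _ hD
  exact solution_eq_alt s hD

theorem solution_changed : Claim_changed_solution := by
  unfold Claim_changed_solution; decide

theorem solution_tight : Claim_exact_solution := by
  intro s _ hD
  exact solution_ne_on_D s hD
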